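-- pv_equiv track=rewrite | github.com/yourjelly/odoo | odoo/addons/base/wizard/base_document_layout.py | average_dominant_color
-- ===== SOURCE A (Python) =====
-- def average_dominant_color(colors, margin):
--     dominant_color = max(colors)
--     dominant_set = [dominant_color]
--     colors.remove(dominant_color)
--     remaining = []
--
--     for color in colors:
--         # Test similarity (r, g and b are within <margin> of dominant color)
--         if (color[1][0] < dominant_color[1][0] + margin and
--             color[1][0] > dominant_color[1][0] - margin and
--             color[1][1] < dominant_color[1][1] + margin and
--             color[1][1] > dominant_color[1][1] - margin and
--             color[1][2] < dominant_color[1][2] + margin and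
--                 color[1][2] > dominant_color[1][2] - margin):
--             dominant_set.append(color)
--         else:
--             remaining.append(color)
--
--     final_avg = []
--     for band in range(3):
--         avg = 0
--         total = 0
--         for color in dominant_set:
--             avg += color[0] * color[1][band]
--             total += color[0]
--         final_avg.append(round(avg / total))
--
--     return final_avg, remaining
-- ===== SOURCE B (Python) =====
-- def average_dominant_color(colors, margin):
--     # Like A, picks the (lexicographically) max color as dominant and removes it
--     # in place; but accumulates the three weighted band sums and the weight total
--     # in ONE pass over the remaining colors, never building the dominant_set list.
--     dominant = max(colors)
--     colors.remove(dominant)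
--     weight, (dr, dg, db) = dominant
--     lo = (dr - margin, dg - margin, db - margin)
--     hi = (dr + margin, dg + margin, db + margin)
--     total = weight
--     sums = [weight * dr, weight * dg, weight * db]
--     remaining = []
--     for color in colors:
--         w, band = color
--         if all(lo[b] < band[b] < hi[b] for b in range(3)):
--             total += w
--             for b in range(3):
--                 sums[b] += w * band[b]
--         else:
--             remaining.append(color)
--     return [round(s / total) for s in sums], remaining
-- ===== Notes on version B (the rewrite author's own statement) =====
-- stated objective: simpler
-- what changed: B fuses A's partition pass and A's three per-band averaging passes into a single loop that accumulates the three weighted band sums and the shared weight total directly, never materialising the dominant_set list.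
import Mathlib
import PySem

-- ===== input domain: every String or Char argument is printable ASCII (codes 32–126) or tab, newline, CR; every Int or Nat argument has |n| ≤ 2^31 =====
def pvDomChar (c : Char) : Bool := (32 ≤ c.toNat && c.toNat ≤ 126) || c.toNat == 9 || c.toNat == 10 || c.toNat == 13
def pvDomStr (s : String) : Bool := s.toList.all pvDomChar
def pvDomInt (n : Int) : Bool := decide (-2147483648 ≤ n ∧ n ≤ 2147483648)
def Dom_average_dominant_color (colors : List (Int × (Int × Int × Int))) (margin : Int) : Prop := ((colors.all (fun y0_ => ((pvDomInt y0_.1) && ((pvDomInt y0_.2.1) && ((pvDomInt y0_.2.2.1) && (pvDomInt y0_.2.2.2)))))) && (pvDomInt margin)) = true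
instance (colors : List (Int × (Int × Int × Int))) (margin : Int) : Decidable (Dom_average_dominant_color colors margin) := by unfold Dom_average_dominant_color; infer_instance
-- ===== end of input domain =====

-- B fuses A's partition pass and A's three per-band averaging passes into one loop that
-- accumulates the three weighted sums and the weight total directly (objective: simpler —
-- no dominant_set list, one pass). A mutates its argument (colors.remove); B performs the
-- same mutation in Python; the Lean equivalence is about the RETURN value.

-- ===== shared helpers (Python built-ins both versions call) =====
-- Python tuple '<' on (int, (int, int, int)): lexicographic. Used by max().
def pyTupleLt (x y : Int × (Int × Int × Int)) : Bool :=
  x.1 < y.1 || (x.1 == y.1 && (x.2.1 < y.2.1 || (x.2.1 == y.2.1 &&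
    (x.2.2.1 < y.2.2.1 || (x.2.2.1 == y.2.2.1 && x.2.2.2 < y.2.2.2)))))

-- round-half-even of N / D for D > 0 (Nat arithmetic)
def pvRndAux (N D : Nat) : Nat :=
  let q := N / D
  let r := N % D
  if 2 * r > D || (2 * r == D && q % 2 == 1) then q + 1 else q

-- Hand-ported, exact: Python round(a/t) for ints a, t with t ≠ 0 (returns 0 for t = 0,
-- excluded by Pre_): first the IEEE-754 binary64 correctly-rounded quotient (53-bit
-- significand, round-to-nearest-even), then round() of that double (half-to-even).
def pyRoundDiv (a t : Int) : Int :=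
  if a == 0 || t == 0 then 0 else
  let neg := decide (a < 0) != decide (t < 0)
  let A := a.natAbs
  let T := t.natAbs
  let d : Int := (Nat.log2 A : Int) - (Nat.log2 T : Int)
  -- e with 2^e ≤ A/T < 2^(e+1)
  let cond := if d ≥ 0 then T <<< d.toNat ≤ A else T ≤ A <<< (-d).toNat
  let e : Int := if cond then d else d - 1
  let sh : Int := e - 52
  let N := if sh ≥ 0 then A else A <<< (-sh).toNat
  let D := if sh ≥ 0 then T <<< sh.toNat else T
  let q := pvRndAux N D
  let q' := if q == 1 <<< 53 then 1 <<< 52 else q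
  let e' := if q == 1 <<< 53 then e + 1 else e
  let sh2 : Int := e' - 52
  let res : Nat := if sh2 ≥ 0 then q' <<< sh2.toNat else pvRndAux q' (1 <<< (-sh2).toNat)
  if neg then -(res : Int) else (res : Int)

-- ===== PORT A =====
-- A's similarity test, conjuncts in A's order
def pvSimA (d : Int × (Int × Int × Int)) (margin : Int) (c : Int × (Int × Int × Int)) : Bool :=
  c.2.1 < d.2.1 + margin && c.2.1 > d.2.1 - margin &&
  c.2.2.1 < d.2.2.1 + margin && c.2.2.1 > d.2.2.1 - margin &&
  c.2.2.2 < d.2.2.2 + margin && c.2.2.2 > d.2.2.2 - margin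

-- color[1][band] for band ∈ range(3)
def pvBand (v : Int × Int × Int) (band : Int) : Int :=
  if band == 0 then v.1 else if band == 1 then v.2.1 else v.2.2

def pvStepA (d : Int × (Int × Int × Int)) (margin : Int)
    (p : List (Int × (Int × Int × Int)) × List (Int × (Int × Int × Int)))
    (c : Int × (Int × Int × Int)) :
    List (Int × (Int × Int × Int)) × List (Int × (Int × Int × Int)) :=
  if pvSimA d margin c then (p.1 ++ [c], p.2) else (p.1, p.2 ++ [c])

def pvSumStepA (band : Int) (s : Int × Int) (c : Int × (Int × Int × Int)) : Int × Int :=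
  (s.1 + c.1 * pvBand c.2 band, s.2 + c.1)

def average_dominant_color (colors : List (Int × (Int × Int × Int))) (margin : Int) :
    List Int × (List (Int × (Int × Int × Int))) :=
  match colors with
  | [] => ([], [])  -- max([]) raises ValueError: excluded by Pre_
  | c0 :: rest0 =>
    -- dominant_color = max(colors)
    let dominant := rest0.foldl (fun m c => if pyTupleLt m c then c else m) c0
    -- colors.remove(dominant_color): first occurrence
    let colors1 := (c0 :: rest0).erase dominant
    -- partition loop: dominant_set starts [dominant_color]
    let pr := colors1.foldl (pvStepA dominant margin) ([dominant], [])
    -- for band in range(3): avg/total accumulated over dominant_set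
    let final_avg := (PySem.List.pyRange 0 3 1).foldl (fun acc band =>
        let s := pr.1.foldl (pvSumStepA band) (0, 0)
        acc ++ [pyRoundDiv s.1 s.2]) []
    (final_avg, pr.2)

-- ===== PORT B =====
-- B's per-band test lo[b] < band[b] < hi[b]; 'all(... for b in range(3))' expanded
def pvStepB (lo hi : Int × Int × Int)
    (st : Int × Int × Int × Int × List (Int × (Int × Int × Int)))
    (c : Int × (Int × Int × Int)) :
    Int × Int × Int × Int × List (Int × (Int × Int × Int)) :=
  if lo.1 < c.2.1 && c.2.1 < hi.1 && lo.2.1 < c.2.2.1 && c.2.2.1 < hi.2.1 &&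
     lo.2.2 < c.2.2.2 && c.2.2.2 < hi.2.2 then
    (st.1 + c.1, st.2.1 + c.1 * c.2.1, st.2.2.1 + c.1 * c.2.2.1, st.2.2.2.1 + c.1 * c.2.2.2, st.2.2.2.2)
  else
    (st.1, st.2.1, st.2.2.1, st.2.2.2.1, st.2.2.2.2 ++ [c])

def average_dominant_color_alt (colors : List (Int × (Int × Int × Int))) (margin : Int) :
    List Int × (List (Int × (Int × Int × Int))) :=
  match colors with
  | [] => ([], [])  -- max([]) raises ValueError: excluded by Pre_
  | c0 :: rest0 =>
    let dominant := rest0.foldl (fun m c => if pyTupleLt m c then c else m) c0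
    let colors1 := (c0 :: rest0).erase dominant
    let w := dominant.1
    let dr := dominant.2.1
    let dg := dominant.2.2.1
    let db := dominant.2.2.2
    let lo := (dr - margin, dg - margin, db - margin)
    let hi := (dr + margin, dg + margin, db + margin)
    -- single pass: (total, s0, s1, s2, remaining)
    let st := colors1.foldl (pvStepB lo hi) (w, w * dr, w * dg, w * db, [])
    ([pyRoundDiv st.2.1 st.1, pyRoundDiv st.2.2.1 st.1, pyRoundDiv st.2.2.2.1 st.1], st.2.2.2.2)

-- ===== PRECONDITION & SPEC =====
-- total weight of the dominant-similar set (the divisor of A's 'avg / total')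
def pvPreTotal (colors : List (Int × (Int × Int × Int))) (margin : Int) : Int :=
  match colors with
  | [] => 0
  | c0 :: rest0 =>
    let d := rest0.foldl (fun m c => if pyTupleLt m c then c else m) c0
    d.1 + ((((c0 :: rest0).erase d).filter (fun c => pvSimA d margin c)).map (fun c => c.1)).sum

-- Exactly the inputs where Python A returns: nonempty (else max([]) raises ValueError)
-- and nonzero total weight of the dominant-similar set (else ZeroDivisionError).
def Pre_average_dominant_color (colors : List (Int × (Int × Int × Int))) (margin : Int) : Prop :=
  colors ≠ [] ∧ pvPreTotal colors margin ≠ 0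
instance (colors : List (Int × (Int × Int × Int))) (margin : Int) : Decidable (Pre_average_dominant_color colors margin) := by unfold Pre_average_dominant_color; infer_instance

def pvWitness_average_dominant_color : (List (Int × (Int × Int × Int))) × Int := ([(1, (0, 0, 0))], 0)

def Spec_average_dominant_color (colors : List (Int × (Int × Int × Int))) (margin : Int) (out : List Int × (List (Int × (Int × Int × Int)))) : Prop := out = average_dominant_color_alt colors margin
instance (colors : List (Int × (Int × Int × Int))) (margin : Int) (out : List Int × (List (Int × (Int × Int × Int)))) : Decidable (Spec_average_dominant_color colors margin out) := by unfold Spec_average_dominant_color; infer_instance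

-- ===== CLAIM (what is proved, stated in full; the proofs are below) =====
def Claim_equal_average_dominant_color : Prop := ∀ (colors : List (Int × (Int × Int × Int))) (margin : Int), Dom_average_dominant_color colors margin → Pre_average_dominant_color colors margin → Spec_average_dominant_color colors margin (average_dominant_color colors margin)

-- ===== LEMMAS AND PROOFS =====

lemma pv_part_fold (d : Int × (Int × Int × Int)) (margin : Int) :
    ∀ (l acc rem : List (Int × (Int × Int × Int))),
      l.foldl (pvStepA d margin) (acc, rem) =
        (acc ++ l.filter (fun c => pvSimA d margin c),
         rem ++ l.filter (fun c => ! pvSimA d margin c)) := by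
  intro l
  induction l with
  | nil => simp
  | cons x xs ih =>
    intro acc rem
    by_cases h : pvSimA d margin x
    · simp [pvStepA, h, ih]
    · simp [pvStepA, h, ih]

lemma pv_sum_fold (band : Int) :
    ∀ (l : List (Int × (Int × Int × Int))) (a t : Int),
      l.foldl (pvSumStepA band) (a, t) =
        (a + (l.map (fun c => c.1 * pvBand c.2 band)).sum,
         t + (l.map (fun c => c.1)).sum) := by
  intro l
  induction l with
  | nil => intro a t; simp
  | cons x xs ih =>
    intro a t
    simp [pvSumStepA, ih]
    constructor <;> ring

lemma pv_condB_eq (d : Int × (Int × Int × Int)) (margin : Int) (c : Int × (Int × Int × Int)) :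
    (d.2.1 - margin < c.2.1 && c.2.1 < d.2.1 + margin &&
     d.2.2.1 - margin < c.2.2.1 && c.2.2.1 < d.2.2.1 + margin &&
     d.2.2.2 - margin < c.2.2.2 && c.2.2.2 < d.2.2.2 + margin) = pvSimA d margin c := by
  rw [Bool.eq_iff_iff]
  simp only [pvSimA, Bool.and_eq_true, decide_eq_true_eq, gt_iff_lt]
  constructor <;> intro h <;> omega

lemma pv_fold_B (d : Int × (Int × Int × Int)) (margin : Int) :
    ∀ (l : List (Int × (Int × Int × Int))) (tot s0 s1 s2 : Int)
      (rem : List (Int × (Int × Int × Int))),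
      l.foldl (pvStepB (d.2.1 - margin, d.2.2.1 - margin, d.2.2.2 - margin)
                       (d.2.1 + margin, d.2.2.1 + margin, d.2.2.2 + margin))
        (tot, s0, s1, s2, rem) =
        (tot + ((l.filter (fun c => pvSimA d margin c)).map (fun c => c.1)).sum,
         s0 + ((l.filter (fun c => pvSimA d margin c)).map (fun c => c.1 * c.2.1)).sum,
         s1 + ((l.filter (fun c => pvSimA d margin c)).map (fun c => c.1 * c.2.2.1)).sum,
         s2 + ((l.filter (fun c => pvSimA d margin c)).map (fun c => c.1 * c.2.2.2)).sum,
         rem ++ l.filter (fun c => ! pvSimA d margin c)) := by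
  intro l
  induction l with
  | nil => intro tot s0 s1 s2 rem; simp
  | cons x xs ih =>
    intro tot s0 s1 s2 rem
    by_cases h : pvSimA d margin x
    · have hc := pv_condB_eq d margin x
      simp only [List.foldl_cons, pvStepB, hc, h, if_pos, List.filter_cons, ih]
      simp
      refine ⟨by ring, by ring, by ring, by ring⟩
    · have hc := pv_condB_eq d margin x
      simp only [List.foldl_cons, pvStepB, hc, h, List.filter_cons, ih]
      simp

lemma pv_pyRange3 : PySem.List.pyRange 0 3 1 = [0, 1, 2] := by decide

-- ===== VERDICT (by name: the statement is the Claim_ definition above) =====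
theorem average_dominant_color_spec : Claim_equal_average_dominant_color := by
  intro colors margin _ _
  unfold Spec_average_dominant_color
  cases colors with
  | nil => rfl
  | cons c0 rest0 =>
    simp only [average_dominant_color, average_dominant_color_alt]
    rw [pv_part_fold, pv_fold_B, pv_pyRange3]
    simp only [List.foldl_cons, List.foldl_nil, pv_sum_fold]
    simp [pvBand]
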